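-- pv_equiv track=rewrite | github.com/BrantYHX/DLC-Project | Figure 10_Exploratory_Behaviour.py | count_pups_outside
-- ===== SOURCE A (Python) =====
-- def count_pups_outside(huddle_list):
--     """
--     Count the number of pups that are outside the huddle in each frame.
--
--     Parameters:
--         huddle_list (list of lists): Each sublist contains "Inside"/"Outside"/"NAN" per frame.
--
--     Returns:
--         list: Number of pups outside the huddle per frame.
--     """
--     pup_statuses = huddle_list[1:]  # exclude the mother
--     num_frames = len(pup_statuses[0])
--     count_per_frame = []
--
--     for frame_idx in range(num_frames):
--         count = sum(1 for pup in pup_statuses if pup[frame_idx] == "Outside")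
--         count_per_frame.append(count)
--
--     return count_per_frame
-- ===== SOURCE B (Python) =====
-- def count_pups_outside(huddle_list):
--     """
--     Count the number of pups that are outside the huddle in each frame.
--
--     Single pass over the pups, maintaining a running per-frame accumulator
--     (instead of an independent scan of all pups for every frame).
--     """
--     pup_statuses = huddle_list[1:]  # exclude the mother
--     num_frames = len(pup_statuses[0])
--     counts = [0] * num_frames
--     for pup in pup_statuses:
--         counts = [c + (pup[i] == "Outside") for i, c in enumerate(counts)]
--     return counts
-- ===== Notes on version B (the rewrite author's own statement) =====
-- stated objective: alternative
-- what changed: Swapped the loop nesting: instead of an independent scan over all pups for every frame, B makes one pass over the pups and maintains a running per-frame accumulator array.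
import Mathlib
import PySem

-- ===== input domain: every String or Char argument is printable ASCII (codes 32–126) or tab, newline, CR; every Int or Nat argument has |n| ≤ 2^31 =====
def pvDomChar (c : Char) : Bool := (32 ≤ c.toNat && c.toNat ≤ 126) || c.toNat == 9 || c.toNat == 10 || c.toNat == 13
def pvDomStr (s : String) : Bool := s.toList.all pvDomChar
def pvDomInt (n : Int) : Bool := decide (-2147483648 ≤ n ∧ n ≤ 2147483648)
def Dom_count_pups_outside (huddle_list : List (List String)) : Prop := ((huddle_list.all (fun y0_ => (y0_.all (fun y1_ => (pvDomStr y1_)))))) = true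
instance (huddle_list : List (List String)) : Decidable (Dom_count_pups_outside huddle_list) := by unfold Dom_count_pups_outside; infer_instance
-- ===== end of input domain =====

-- B swaps the loop nesting: one pass over the pups maintaining a running per-frame
-- accumulator, instead of an independent per-frame scan over all pups (objective: alternative).


-- ===== PORT A =====
-- pup_statuses = huddle_list[1:]; num_frames = len(pup_statuses[0]) (IndexError when no pups —
-- excluded by Pre_); for frame_idx in range(num_frames): append sum(1 for pup if pup[frame_idx]=="Outside")
def count_pups_outside (huddle_list : List (List String)) : List Int :=
  let pup_statuses := huddle_list.drop 1
  let num_frames := (pup_statuses.headD []).length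
  (PySem.List.pyRange 0 (num_frames : Int) 1).foldl
    (fun count_per_frame frame_idx =>
      count_per_frame ++
        [pup_statuses.foldl
          (fun count pup =>
            if PySem.List.pyGet? pup frame_idx = some "Outside" then count + 1 else count)
          0])
    []

-- ===== PORT B =====
-- counts = [0]*num_frames; for pup: counts = [c + (pup[i]=="Outside") for i, c in enumerate(counts)]
def count_pups_outside_alt (huddle_list : List (List String)) : List Int :=
  let pup_statuses := huddle_list.drop 1
  let num_frames := (pup_statuses.headD []).length
  pup_statuses.foldl
    (fun counts pup =>
      (PySem.List.enumerate counts 0).map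
        (fun ic => ic.2 + (if PySem.List.pyGet? pup ic.1 = some "Outside" then 1 else 0)))
    (List.replicate num_frames 0)

-- ===== PRECONDITION & SPEC =====
-- Pre_ excludes exactly the inputs where Python A raises IndexError: fewer than two rows
-- (pup_statuses[0] fails), or a pup row shorter than the first pup row (pup[frame_idx] fails).
def Pre_count_pups_outside (huddle_list : List (List String)) : Prop :=
  2 ≤ huddle_list.length ∧
    ∀ pup ∈ huddle_list.drop 1, ((huddle_list.drop 1).headD []).length ≤ pup.length
instance (huddle_list : List (List String)) : Decidable (Pre_count_pups_outside huddle_list) := by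
  unfold Pre_count_pups_outside; infer_instance

def pvWitness_count_pups_outside : List (List String) :=
  [["mother"], ["Outside", "Inside"], ["Inside", "Outside"]]

def Spec_count_pups_outside (huddle_list : List (List String)) (out : List Int) : Prop := out = count_pups_outside_alt huddle_list
instance (huddle_list : List (List String)) (out : List Int) : Decidable (Spec_count_pups_outside huddle_list out) := by unfold Spec_count_pups_outside; infer_instance

-- ===== CLAIM (what is proved, stated in full; the proofs are below) =====
def Claim_equal_count_pups_outside : Prop := ∀ (huddle_list : List (List String)), Dom_count_pups_outside huddle_list → Pre_count_pups_outside huddle_list → Spec_count_pups_outside huddle_list (count_pups_outside huddle_list)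

-- ===== LEMMAS AND PROOFS =====

-- element k of enumerate(l, s) is (s+k, l[k])
theorem enumerate_get? {α : Type} (l : List α) (s : Int) (k : Nat) :
    (PySem.List.enumerate l s)[k]? = l[k]?.map (fun c => (s + (k : Int), c)) := by
  induction l generalizing s k with
  | nil => simp [PySem.List.enumerate_nil]
  | cons x xs ih =>
    cases k with
    | zero => simp [PySem.List.enumerate_cons]
    | succ m =>
      rw [PySem.List.enumerate_cons]
      simp only [List.getElem?_cons_succ]
      rw [ih (s + 1) m]
      have : s + 1 + (m : Int) = s + ((m + 1 : Nat) : Int) := by push_cast; ring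
      cases xs[m]? <;> simp [this]

-- the B-side fold over the pups, read pointwise: each entry accumulates the count
theorem foldB_get? (pups : List (List String)) (counts : List Int) (k : Nat) :
    (pups.foldl
        (fun counts pup =>
          (PySem.List.enumerate counts 0).map
            (fun ic => ic.2 + (if PySem.List.pyGet? pup ic.1 = some "Outside" then 1 else 0)))
        counts)[k]?
      = counts[k]?.map
          (fun c => c + ((pups.countP
              (fun pup => decide (PySem.List.pyGet? pup (k : Int) = some "Outside")) : Nat) : Int)) := by
  induction pups generalizing counts with
  | nil => simp
  | cons pup rest ih =>
    simp only [List.foldl_cons]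
    rw [ih]
    rw [List.getElem?_map, enumerate_get?]
    rw [List.countP_cons]
    cases counts[k]? with
    | none => simp
    | some c =>
      by_cases h : PySem.List.pyGet? pup (k : Int) = some "Outside" <;>
        simp [h] <;> omega

-- ===== VERDICT (by name: the statement is the Claim_ definition above) =====
theorem count_pups_outside_spec : Claim_equal_count_pups_outside := by
  intro huddle_list _ _
  unfold Spec_count_pups_outside count_pups_outside count_pups_outside_alt
  simp only []
  set pups := huddle_list.drop 1 with hp
  set n := (pups.headD []).length with hn
  rw [PySem.List.pyRange_zero_nat, List.foldl_map,
      PySem.List.foldl_append_singleton_eq_map, List.nil_append]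
  apply List.ext_getElem?
  intro k
  rw [foldB_get?, List.getElem?_map]
  by_cases hk : k < n
  · have h := PySem.List.foldl_count_if
      (fun pup => decide (PySem.List.pyGet? pup (k : Int) = some "Outside")) pups 0
    simp [hk]
    simpa using h
  · simp [hk]

theorem count_pups_outside_pre_witness :
    Dom_count_pups_outside pvWitness_count_pups_outside ∧
      Pre_count_pups_outside pvWitness_count_pups_outside := by
  constructor <;> decide
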